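-- pv_equiv track=rewrite | github.com/RAIK283H/pathfinding-code-apatchipulusu018 | permutation.py | findLargestMobileVariable
-- ===== SOURCE A (Python) =====
-- def findLargestMobileVariable(n, perm, directions):
--     largest_mobile_index = -1
--     for i in range(n):
--         target_index = i + directions[i]
--
--         # Check if `i` is mobile
--         if 0 <= target_index < n and perm[i] > perm[target_index]:
--             # Update if no mobile found yet or if this one is larger
--             if largest_mobile_index == -1 or perm[i] > perm[largest_mobile_index]:
--                 largest_mobile_index = i
--             elif perm[i] == perm[largest_mobile_index] and i > largest_mobile_index:
--                 # In case of tie, choose the rightmost mobile index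
--                 largest_mobile_index = i
--
--     return largest_mobile_index
-- ===== SOURCE B (Python) =====
-- def findLargestMobileVariable(n, perm, directions):
--     # Scan candidates in decreasing (perm value, index) order; the first mobile one wins.
--     for i in sorted(range(n), key=lambda j: (perm[j], j), reverse=True):
--         t = i + directions[i]
--         if 0 <= t < n and perm[i] > perm[t]:
--             return i
--     return -1
-- ===== Notes on version B (the rewrite author's own statement) =====
-- stated objective: alternative
-- what changed: Replaces A's single running-best scan (with -1 sentinel and three-way tie-break update) by sorting the indices in decreasing (perm[i], i) order and returning the first mobile one, so the selection logic disappears into the sort order and a first-match search.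
-- outside the precondition, e.g. on findLargestMobileVariable(1, [], [1]): A returns -1, B raises IndexError
import Mathlib
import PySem

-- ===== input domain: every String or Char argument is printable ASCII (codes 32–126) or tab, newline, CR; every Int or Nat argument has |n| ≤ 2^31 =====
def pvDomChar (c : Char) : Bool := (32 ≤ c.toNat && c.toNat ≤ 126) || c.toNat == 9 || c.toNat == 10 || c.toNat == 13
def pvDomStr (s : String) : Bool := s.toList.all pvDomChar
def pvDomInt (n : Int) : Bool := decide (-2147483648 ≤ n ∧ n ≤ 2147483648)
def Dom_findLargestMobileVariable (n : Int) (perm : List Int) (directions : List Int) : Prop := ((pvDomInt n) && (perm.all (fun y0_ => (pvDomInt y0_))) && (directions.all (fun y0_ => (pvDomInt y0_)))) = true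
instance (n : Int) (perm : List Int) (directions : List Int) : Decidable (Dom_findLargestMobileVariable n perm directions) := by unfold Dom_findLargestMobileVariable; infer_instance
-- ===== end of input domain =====

-- B replaces A's running-best scan (with -1 sentinel and three-way tie-break update) by
-- sorting the indices in decreasing (perm[i], i) order and returning the first mobile one;
-- objective: alternative (not faster).

-- ===== PORT A =====
def findLargestMobileVariable (n : Int) (perm : List Int) (directions : List Int) : Int :=
  (PySem.List.pyRange 0 n 1).foldl
    (fun largest_mobile_index i =>
      let target_index := i + PySem.List.pyGetD directions i 0
      if 0 ≤ target_index ∧ target_index < n ∧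
          PySem.List.pyGetD perm i 0 > PySem.List.pyGetD perm target_index 0 then
        if largest_mobile_index = -1 ∨
            PySem.List.pyGetD perm i 0 > PySem.List.pyGetD perm largest_mobile_index 0 then i
        else if PySem.List.pyGetD perm i 0 = PySem.List.pyGetD perm largest_mobile_index 0 ∧
            largest_mobile_index < i then i
        else largest_mobile_index
      else largest_mobile_index)
    (-1)

-- ===== PORT B =====
def findLargestMobileVariable_alt (n : Int) (perm : List Int) (directions : List Int) : Int :=
  match (PySem.List.sorted2 (PySem.List.pyRange 0 n 1)
      (fun j => PySem.List.pyGetD perm j 0) (fun j => j) true).find?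
      (fun i => decide (0 ≤ i + PySem.List.pyGetD directions i 0 ∧
          i + PySem.List.pyGetD directions i 0 < n ∧
          PySem.List.pyGetD perm i 0 >
            PySem.List.pyGetD perm (i + PySem.List.pyGetD directions i 0) 0)) with
  | some i => i
  | none => -1

-- ===== PRECONDITION & SPEC =====
-- Pre_ excludes exactly the inputs on which an IndexError is raised: A raises when some
-- i < n is out of range for `directions` or for a mobile-guarded `perm` access; B reads
-- perm[j] for every j < n in its sort key and so itself raises on the few extra inputs
-- (perm shorter than n but never reached by A's guard) that this Pre_ also excludes.
def Pre_findLargestMobileVariable (n : Int) (perm : List Int) (directions : List Int) : Prop :=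
  n ≤ (directions.length : Int) ∧ n ≤ (perm.length : Int)
instance (n : Int) (perm : List Int) (directions : List Int) : Decidable (Pre_findLargestMobileVariable n perm directions) := by unfold Pre_findLargestMobileVariable; infer_instance

def pvWitness_findLargestMobileVariable : Int × List Int × List Int := (3, ([1, 2, 3], [-1, -1, -1]))

def Spec_findLargestMobileVariable (n : Int) (perm : List Int) (directions : List Int) (out : Int) : Prop := out = findLargestMobileVariable_alt n perm directions
instance (n : Int) (perm : List Int) (directions : List Int) (out : Int) : Decidable (Spec_findLargestMobileVariable n perm directions out) := by unfold Spec_findLargestMobileVariable; infer_instance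

-- ===== CLAIM (what is proved, stated in full; the proofs are below) =====
def Claim_equal_findLargestMobileVariable : Prop := ∀ (n : Int) (perm : List Int) (directions : List Int), Dom_findLargestMobileVariable n perm directions → Pre_findLargestMobileVariable n perm directions → Spec_findLargestMobileVariable n perm directions (findLargestMobileVariable n perm directions)

-- ===== LEMMAS AND PROOFS =====

-- The strict lexicographic order on the composite key (perm[i], i).
def pvLt (perm : List Int) (a b : Int) : Bool :=
  decide (PySem.List.pyGetD perm a 0 < PySem.List.pyGetD perm b 0) ||
    (!decide (PySem.List.pyGetD perm b 0 < PySem.List.pyGetD perm a 0) && decide (a < b))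

theorem pvLt_irrefl (perm : List Int) (a : Int) : pvLt perm a a = false := by
  simp [pvLt]

theorem pvLt_total (perm : List Int) (a b : Int) :
    pvLt perm a b = false → pvLt perm b a = false → a = b := by
  simp only [pvLt, Bool.or_eq_false_iff, Bool.and_eq_false_iff, Bool.not_eq_false',
    decide_eq_false_iff_not, decide_eq_true_eq]
  omega

theorem pvLt_asymm (perm : List Int) (a b : Int) :
    pvLt perm a b = true → pvLt perm b a = false := by
  simp only [pvLt, Bool.or_eq_true, Bool.and_eq_true, Bool.or_eq_false_iff,
    Bool.and_eq_false_iff, Bool.not_eq_true', Bool.not_eq_false',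
    decide_eq_false_iff_not, decide_eq_true_eq]
  omega

-- z ≤ y < x  ⇒  z ≤ x  (in the pvLt order)
theorem pvLt_lt_ge (perm : List Int) (x y z : Int) :
    pvLt perm y x = true → pvLt perm y z = false → pvLt perm x z = false := by
  simp only [pvLt, Bool.or_eq_true, Bool.and_eq_true, Bool.or_eq_false_iff,
    Bool.and_eq_false_iff, Bool.not_eq_true', Bool.not_eq_false',
    decide_eq_false_iff_not, decide_eq_true_eq]
  omega

-- x ≤ b ∧ b ≤ r  ⇒  x ≤ r  (in the pvLt order)
theorem pvLt_le_trans (perm : List Int) (x b r : Int) :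
    pvLt perm b x = false → pvLt perm r b = false → pvLt perm r x = false := by
  simp only [pvLt, Bool.or_eq_false_iff, Bool.and_eq_false_iff, Bool.not_eq_false',
    decide_eq_false_iff_not, decide_eq_true_eq]
  omega

-- b < x ≤ r  ⇒  b ≤ r  (in the pvLt order)
theorem pvLt_bound (perm : List Int) (b x r : Int) :
    pvLt perm b x = true → pvLt perm r x = false → pvLt perm r b = false := by
  simp only [pvLt, Bool.or_eq_true, Bool.and_eq_true, Bool.or_eq_false_iff,
    Bool.and_eq_false_iff, Bool.not_eq_true', Bool.not_eq_false',
    decide_eq_false_iff_not, decide_eq_true_eq]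
  omega

-- A's update rule once the guard has been peeled off.
def pvInner (perm : List Int) (b i : Int) : Int :=
  if b = -1 ∨ PySem.List.pyGetD perm i 0 > PySem.List.pyGetD perm b 0 then i
  else if PySem.List.pyGetD perm i 0 = PySem.List.pyGetD perm b 0 ∧ b < i then i
  else b

-- A's update step, once a best b ≥ 0 is held, is exactly the pvLt comparison.
theorem pvInner_step (perm : List Int) (b y : Int) (hb : 0 ≤ b) :
    pvInner perm b y = if pvLt perm b y then y else b := by
  unfold pvInner pvLt
  have hb1 : ¬ (b = -1) := by omega
  by_cases h1 : PySem.List.pyGetD perm b 0 < PySem.List.pyGetD perm y 0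
  · simp [h1]
  · by_cases h2 : PySem.List.pyGetD perm y 0 = PySem.List.pyGetD perm b 0
    · by_cases h3 : b < y <;> simp [hb1, h2, h3]
    · have h4 : PySem.List.pyGetD perm y 0 < PySem.List.pyGetD perm b 0 := by omega
      simp [hb1, h1, h2, h4]

-- A's running best over a list of nonnegative indices is a pvLt-maximum of b :: t.
theorem pvInner_foldl_max (perm : List Int) :
    ∀ (t : List Int) (b : Int), 0 ≤ b → (∀ y ∈ t, 0 ≤ y) →
      t.foldl (pvInner perm) b ∈ b :: t ∧
      (∀ y ∈ b :: t, pvLt perm (t.foldl (pvInner perm) b) y = false) := by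
  intro t
  induction t with
  | nil =>
    intro b hb _
    refine ⟨by simp, ?_⟩
    intro y hy
    simp at hy
    simp [hy, pvLt_irrefl]
  | cons x t ih =>
    intro b hb hnn
    have hx : (0:Int) ≤ x := hnn x (by simp)
    have hnt : ∀ y ∈ t, (0:Int) ≤ y := fun y hy => hnn y (by simp [hy])
    rw [List.foldl_cons, pvInner_step perm b x hb]
    by_cases hc : pvLt perm b x = true
    · rw [if_pos hc]
      obtain ⟨hmem, hmax⟩ := ih x hx hnt
      refine ⟨?_, ?_⟩
      · rcases List.mem_cons.mp hmem with h | h <;> simp [h]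
      · intro y hy
        rcases List.mem_cons.mp hy with h | hy2
        · exact h ▸ pvLt_bound perm b x _ hc (hmax x (by simp))
        · exact hmax y hy2
    · rw [if_neg (by simpa using hc)]
      have hbx : pvLt perm b x = false := by revert hc; cases pvLt perm b x <;> simp
      obtain ⟨hmem, hmax⟩ := ih b hb hnt
      refine ⟨?_, ?_⟩
      · rcases List.mem_cons.mp hmem with h | h <;> simp [h]
      · intro y hy
        rcases List.mem_cons.mp hy with h | hy2
        · exact h ▸ hmax b (by simp)
        · rcases List.mem_cons.mp hy2 with h | h
          · exact h ▸ pvLt_le_trans perm x b _ hbx (hmax b (by simp))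
          · exact hmax y (by simp [h])

-- inserting with the reversed pvLt comparison preserves the descending pairwise invariant
theorem pvInsert_pairwise (perm : List Int) (x : Int) (ys : List Int)
    (h : ys.Pairwise (fun a b => pvLt perm a b = false)) :
    (PySem.List.insertBy (fun a b => pvLt perm b a) x ys).Pairwise
      (fun a b => pvLt perm a b = false) := by
  induction ys with
  | nil => simp [PySem.List.insertBy]
  | cons y ys ih =>
    rw [List.pairwise_cons] at h
    obtain ⟨hy, hys⟩ := h
    by_cases hc : pvLt perm y x = true
    · simp only [PySem.List.insertBy, hc, if_true]
      rw [List.pairwise_cons]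
      refine ⟨?_, List.pairwise_cons.mpr ⟨hy, hys⟩⟩
      intro z hz
      rcases List.mem_cons.mp hz with h | h
      · rw [h]; exact pvLt_asymm perm y x hc
      · exact pvLt_lt_ge perm x y z hc (hy z h)
    · simp only [PySem.List.insertBy, hc]
      rw [if_neg (by simp)]
      rw [List.pairwise_cons]
      refine ⟨?_, ih hys⟩
      intro z hz
      rcases (PySem.List.mem_insertBy _ x z ys).mp hz with h | h
      · rw [h]; simpa using hc
      · exact hy z h

-- B's sort produces a pvLt-descending list
theorem pvSorted_pairwise (perm : List Int) (xs : List Int) :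
    (PySem.List.sorted2 xs (fun j => PySem.List.pyGetD perm j 0) (fun j => j) true).Pairwise
      (fun a b => pvLt perm a b = false) := by
  show (xs.foldl (fun acc x => PySem.List.insertBy (fun a b => pvLt perm b a) x acc)
      []).Pairwise (fun a b => pvLt perm a b = false)
  have : ∀ (l : List Int) (acc : List Int),
      acc.Pairwise (fun a b => pvLt perm a b = false) →
      (l.foldl (fun acc x => PySem.List.insertBy (fun a b => pvLt perm b a) x acc)
        acc).Pairwise (fun a b => pvLt perm a b = false) := by
    intro l
    induction l with
    | nil => intro acc h; exact h
    | cons x l ih =>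
      intro acc h
      exact ih _ (pvInsert_pairwise perm x acc h)
  exact this xs [] List.Pairwise.nil

-- the first match of find? on a pvLt-descending list is a pvLt-maximum among matches
theorem pvFind_max (perm : List Int) (g : Int → Bool) :
    ∀ (S : List Int), S.Pairwise (fun a b => pvLt perm a b = false) →
      ∀ m, S.find? g = some m →
        g m = true ∧ m ∈ S ∧ ∀ y ∈ S, g y = true → pvLt perm m y = false := by
  intro S
  induction S with
  | nil => intro _ m h; simp at h
  | cons x S ih =>
    intro hp m hm
    rw [List.pairwise_cons] at hp
    obtain ⟨hx, hS⟩ := hp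
    by_cases hg : g x = true
    · rw [List.find?_cons_of_pos hg] at hm
      injection hm with hxm
      subst hxm
      refine ⟨hg, by simp, ?_⟩
      intro y hy _
      rcases List.mem_cons.mp hy with h | h
      · exact h ▸ pvLt_irrefl perm _
      · exact hx y h
    · rw [List.find?_cons_of_neg (by simpa using hg)] at hm
      obtain ⟨h1, h2, h3⟩ := ih hS m hm
      refine ⟨h1, by simp [h2], ?_⟩
      intro y hy hgy
      rcases List.mem_cons.mp hy with h | h
      · subst h; exact absurd hgy (by simpa using hg)
      · exact h3 y h hgy

-- ===== VERDICT (by name: the statement is the Claim_ definition above) =====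
theorem findLargestMobileVariable_spec : Claim_equal_findLargestMobileVariable := by
  intro n perm directions _ _
  unfold Spec_findLargestMobileVariable findLargestMobileVariable findLargestMobileVariable_alt
  set g : Int → Bool := fun i => decide (0 ≤ i + PySem.List.pyGetD directions i 0 ∧
      i + PySem.List.pyGetD directions i 0 < n ∧
      PySem.List.pyGetD perm i 0 >
        PySem.List.pyGetD perm (i + PySem.List.pyGetD directions i 0) 0) with hg
  set S := PySem.List.sorted2 (PySem.List.pyRange 0 n 1)
      (fun j => PySem.List.pyGetD perm j 0) (fun j => j) true with hSdef
  have hSperm : S.Perm (PySem.List.pyRange 0 n 1) := PySem.List.sorted2_perm _ _ _ _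
  have hSpair := pvSorted_pairwise perm (PySem.List.pyRange 0 n 1)
  show (PySem.List.pyRange 0 n 1).foldl
      (fun b i => if 0 ≤ i + PySem.List.pyGetD directions i 0 ∧
          i + PySem.List.pyGetD directions i 0 < n ∧
          PySem.List.pyGetD perm i 0 >
            PySem.List.pyGetD perm (i + PySem.List.pyGetD directions i 0) 0 then
        pvInner perm b i else b) (-1) = _
  rw [PySem.List.foldl_ite_eq_foldl_filter
      (p := fun i => 0 ≤ i + PySem.List.pyGetD directions i 0 ∧
        i + PySem.List.pyGetD directions i 0 < n ∧
        PySem.List.pyGetD perm i 0 >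
          PySem.List.pyGetD perm (i + PySem.List.pyGetD directions i 0) 0)
      (f := pvInner perm)]
  cases hF : (PySem.List.pyRange 0 n 1).filter g with
  | nil =>
    have hnone : S.find? g = none := by
      rw [List.find?_eq_none]
      intro y hyS hgy
      have hyR : y ∈ PySem.List.pyRange 0 n 1 := hSperm.mem_iff.mp hyS
      have : y ∈ (PySem.List.pyRange 0 n 1).filter g := List.mem_filter.mpr ⟨hyR, hgy⟩
      rw [hF] at this
      simp at this
    rw [hnone]
    rfl
  | cons x t =>
    have hmemF : ∀ y ∈ x :: t, y ∈ PySem.List.pyRange 0 n 1 ∧ g y = true := by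
      intro y hy
      have : y ∈ (PySem.List.pyRange 0 n 1).filter g := by rw [hF]; exact hy
      exact ⟨(List.mem_filter.mp this).1, (List.mem_filter.mp this).2⟩
    have hnn : ∀ y ∈ x :: t, (0:Int) ≤ y := fun y hy =>
      (PySem.List.mem_pyRange_one.mp (hmemF y hy).1).1
    have hx : (0:Int) ≤ x := hnn x (by simp)
    have hnt : ∀ y ∈ t, (0:Int) ≤ y := fun y hy => hnn y (by simp [hy])
    have h0 : pvInner perm (-1) x = x := by unfold pvInner; simp
    rw [List.foldl_cons, h0]
    obtain ⟨hrmem, hrmax⟩ := pvInner_foldl_max perm t x hx hnt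
    set r := t.foldl (pvInner perm) x with hr
    have hrF : r ∈ x :: t := hrmem
    have hgr : g r = true := (hmemF r hrF).2
    have hrS : r ∈ S := hSperm.mem_iff.mpr (hmemF r hrF).1
    cases hfind : S.find? g with
    | none =>
      rw [List.find?_eq_none] at hfind
      exact absurd hgr (by simpa using hfind r hrS)
    | some m =>
      obtain ⟨hgm, hmS, hmmax⟩ := pvFind_max perm g S hSpair m hfind
      have hmF : m ∈ x :: t := by
        have hmR : m ∈ PySem.List.pyRange 0 n 1 := hSperm.mem_iff.mp hmS
        have : m ∈ (PySem.List.pyRange 0 n 1).filter g := List.mem_filter.mpr ⟨hmR, hgm⟩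
        rw [hF] at this; exact this
      have h1 : pvLt perm r m = false := hrmax m hmF
      have h2 : pvLt perm m r = false := hmmax r hrS hgr
      exact pvLt_total perm r m h1 h2
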